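-- pv_equiv track=rewrite | github.com/Nchpg/Advent-of-Code-2024 | 2023/DAY12/Day12_1.py | _try
-- ===== SOURCE A (Python) =====
-- def _try(a, b, n):
--     if "?" in a:
--         return False
--     i = 0
--     j = 0
--     k = 0
--     while i < n:
--         if a[i] == '#':
--             j+=1
--         else:
--             if j > 0:
--                 if k >= len(b):
--                     return False
--                 if b[k] != j:
--                     return False
--                 k+=1
--             j = 0
--         i+=1
--     if a[-1] == '#':
--         if k >= len(b):
--             return False
--         if b[k] != j:
--             return False
--         k += 1
--     if k < len(b):
--         return False
--     return True
-- ===== SOURCE B (Python) =====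
-- def _try(a, b, n):
--     if "?" in a:
--         return False
--     blocks = "".join(c if c == '#' else ' ' for c in a[:n]).split()
--     return [len(r) for r in blocks] == list(b)
-- ===== Notes on version B (the rewrite author's own statement) =====
-- stated objective: idiomatic
-- what changed: A's streaming character scan that checks each finished '#'-group against b with early returns is replaced by building the whole list of '#'-run lengths of a[:n] (join/split) and one whole-list equality against b; Pre_ keeps the natural domain (nonempty a, 0 <= n <= len(a)): empty a or n > len(a) make A's direct indexing raise IndexError (early mismatches can return False there first), and a negative n is a count outside the natural domain.
-- intended difference: When 0 <= n < len(a) and exactly one of a[:n] and a ends in '#' (and b equals one of the two candidate run lists), A's tail test reads a[-1] instead of the end of the scanned prefix, so it drops the prefix's trailing run or appends a spurious zero-length group and answers for the wrong list; B answers whether b equals the '#'-run lengths of a[:n], the intended value. — e.g. on _try("##.", [2], 2): A returns false, B returns true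
-- outside the precondition, e.g. on _try('##', [1], -1): A returns False, B returns True; on _try('#.', [], 5): A returns False, B returns False
import Mathlib
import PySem

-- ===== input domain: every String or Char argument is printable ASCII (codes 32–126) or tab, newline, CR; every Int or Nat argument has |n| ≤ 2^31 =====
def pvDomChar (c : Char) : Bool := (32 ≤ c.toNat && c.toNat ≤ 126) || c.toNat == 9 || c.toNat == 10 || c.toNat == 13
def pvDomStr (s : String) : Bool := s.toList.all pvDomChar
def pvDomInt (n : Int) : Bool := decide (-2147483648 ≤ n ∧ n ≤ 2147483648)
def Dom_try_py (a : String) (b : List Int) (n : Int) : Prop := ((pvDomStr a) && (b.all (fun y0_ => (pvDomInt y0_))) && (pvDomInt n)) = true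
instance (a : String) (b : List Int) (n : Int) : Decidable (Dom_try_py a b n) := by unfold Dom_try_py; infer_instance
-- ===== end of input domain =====

-- B replaces A's streaming early-returning character scan by building the whole list of
-- '#'-run lengths of a[:n] and comparing it wholesale against b (alternative decomposition).

-- ===== PORT A =====
-- the while loop of A: returns none on IndexError (a[i] out of range), Sum.inl on an early
-- `return False`, Sum.inr (j, k) when the loop exits normally
def pvALoop (s : List Char) (b : List Int) (n i j k : Int) : Option (Bool ⊕ (Int × Int)) :=
  if _h : i < n then
    match PySem.List.pyGet? s i with
    | none => none
    | some c =>
      if c = '#' then pvALoop s b n (i+1) (j+1) k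
      else
        if j > 0 then
          if (b.length : Int) ≤ k then some (Sum.inl false)
          else if PySem.List.pyGet? b k ≠ some j then some (Sum.inl false)
          else pvALoop s b n (i+1) 0 (k+1)
        else pvALoop s b n (i+1) 0 k
  else some (Sum.inr (j, k))
termination_by (n - i).toNat
decreasing_by all_goals omega

def try_py (a : String) (b : List Int) (n : Int) : Bool :=
  let s := a.toList
  if PySem.Chars.isIn ['?'] s then false
  else
    match pvALoop s b n 0 0 0 with
    | none => false  -- IndexError in the loop; excluded by Pre_try_py
    | some (Sum.inl r) => r
    | some (Sum.inr (j, k)) =>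
      match PySem.List.pyGet? s (-1) with
      | none => false  -- IndexError a[-1] on empty a; excluded by Pre_try_py
      | some c =>
        if c = '#' then
          if (b.length : Int) ≤ k then false
          else if PySem.List.pyGet? b k ≠ some j then false
          else decide (¬ (k + 1 < (b.length : Int)))
        else decide (¬ (k < (b.length : Int)))

-- ===== PORT B =====
def try_py_alt (a : String) (b : List Int) (n : Int) : Bool :=
  let s := a.toList
  if PySem.Chars.isIn ['?'] s then false
  else
    let blocks := PySem.Chars.split₀ ((PySem.List.slice s none (some n)).map
        (fun c => if c = '#' then c else ' '))
    decide (blocks.map (fun r => (r.length : Int)) = b)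

-- ===== PRECONDITION & SPEC =====
-- Pre_ restricts to the function's natural domain: n is the scanned length of a (it equals
-- len(a) at every call site), so Pre_ keeps 0 ≤ n ≤ len(a) and nonempty a; outside it A's
-- direct indexing (a[i], a[-1]) raises IndexError for empty a or n > len(a) (early group
-- mismatches can return False there first), and negative n is a count outside the natural
-- domain (A then inspects only a[-1]).
def Pre_try_py (a : String) (b : List Int) (n : Int) : Prop :=
  '?' ∈ a.toList ∨ (a.toList ≠ [] ∧ 0 ≤ n ∧ n ≤ (a.toList.length : Int))
instance (a : String) (b : List Int) (n : Int) : Decidable (Pre_try_py a b n) := by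
  unfold Pre_try_py; infer_instance

def pvWitness_try_py : String × List Int × Int := ("#.##", [1, 2], 4)

-- '#'-run lengths of a character list, with a run of length j already open (spec helper for D_)
def pvG : List Char → Nat → List Int
  | [], j => if j = 0 then [] else [(j : Int)]
  | c :: r, j =>
    if c = '#' then pvG r (j+1) else (if j = 0 then [] else [(j : Int)]) ++ pvG r 0

-- When 0 ≤ n < len(a) and exactly one of a[:n] and a ends in '#', and b equals one of the two
-- candidate run lists, A's tail test reads a[-1] instead of the end of the scanned prefix —
-- dropping the prefix's trailing run or appending a spurious zero-length group — so A answers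
-- for the wrong group list, while B answers whether b is the list of '#'-run lengths of a[:n],
-- the intended value.
def D_try_py (a : String) (b : List Int) (n : Int) : Prop :=
  '?' ∉ a.toList ∧ a.toList ≠ [] ∧ 0 ≤ n ∧ n < (a.toList.length : Int) ∧
  ¬ (((a.toList.take n.toNat).getLast? = some '#') ↔ (a.toList.getLast? = some '#')) ∧
  (b = pvG (a.toList.take n.toNat) 0 ∨
   b = (if a.toList.getLast? = some '#' then pvG (a.toList.take n.toNat) 0 ++ [0]
        else (pvG (a.toList.take n.toNat) 0).dropLast))
instance (a : String) (b : List Int) (n : Int) : Decidable (D_try_py a b n) := by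
  unfold D_try_py; infer_instance

def Spec_try_py (a : String) (b : List Int) (n : Int) (out : Bool) : Prop :=
  ¬ D_try_py a b n → out = try_py_alt a b n
instance (a : String) (b : List Int) (n : Int) (out : Bool) : Decidable (Spec_try_py a b n out) := by
  unfold Spec_try_py; infer_instance

def pvDiffWitness_try_py : String × List Int × Int := ("##.", [2], 2)
def pvDiffWitnessOut_try_py : Bool × Bool := (false, true)

-- ===== CLAIM (what is proved, stated in full; the proofs are below) =====
def Claim_unchanged_try_py : Prop := ∀ (a : String) (b : List Int) (n : Int), Dom_try_py a b n → Pre_try_py a b n → Spec_try_py a b n (try_py a b n)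
def Claim_changed_try_py : Prop := Dom_try_py (pvDiffWitness_try_py.1) (pvDiffWitness_try_py.2.1) (pvDiffWitness_try_py.2.2) ∧ Pre_try_py (pvDiffWitness_try_py.1) (pvDiffWitness_try_py.2.1) (pvDiffWitness_try_py.2.2) ∧ D_try_py (pvDiffWitness_try_py.1) (pvDiffWitness_try_py.2.1) (pvDiffWitness_try_py.2.2) ∧ try_py (pvDiffWitness_try_py.1) (pvDiffWitness_try_py.2.1) (pvDiffWitness_try_py.2.2) = pvDiffWitnessOut_try_py.1 ∧ try_py_alt (pvDiffWitness_try_py.1) (pvDiffWitness_try_py.2.1) (pvDiffWitness_try_py.2.2) = pvDiffWitnessOut_try_py.2 ∧ pvDiffWitnessOut_try_py.1 ≠ pvDiffWitnessOut_try_py.2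
def Claim_exact_try_py : Prop := ∀ (a : String) (b : List Int) (n : Int), Dom_try_py a b n → Pre_try_py a b n → D_try_py a b n → try_py a b n ≠ try_py_alt a b n

-- ===== LEMMAS AND PROOFS =====

-- completed '#'-run lengths of cs, with a run of length j already open
def pvRuns (cs : List Char) (j : Nat) : List Nat :=
  match cs with
  | [] => []
  | c :: r => if c = '#' then pvRuns r (j+1) else (if j = 0 then [] else [j]) ++ pvRuns r 0

-- length of the '#'-run still open after scanning cs, starting with j open
def pvTrail (cs : List Char) (j : Nat) : Nat :=
  match cs with
  | [] => j
  | c :: r => if c = '#' then pvTrail r (j+1) else pvTrail r 0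

-- A's loop body rephrased on the remaining character list
def pvL (cs : List Char) (b : List Int) (j k : Int) : Bool ⊕ (Int × Int) :=
  match cs with
  | [] => Sum.inr (j, k)
  | c :: rest =>
    if c = '#' then pvL rest b (j+1) k
    else
      if j > 0 then
        if (b.length : Int) ≤ k then Sum.inl false
        else if PySem.List.pyGet? b k ≠ some j then Sum.inl false
        else pvL rest b 0 (k+1)
      else pvL rest b 0 k

theorem pvALoop_eq (s : List Char) (b : List Int) (n : Int) (hn : n ≤ (s.length : Int))
    (i : Nat) (j k : Int) :
    pvALoop s b n (i : Int) j k = some (pvL ((s.take n.toNat).drop i) b j k) := by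
  by_cases h : (i : Int) < n
  · have hfuel : ∀ f (i : Nat) (j k : Int), (n - i).toNat ≤ f →
        pvALoop s b n (i : Int) j k = some (pvL ((s.take n.toNat).drop i) b j k) := by
      intro f
      induction f with
      | zero =>
        intro i j k hf
        have hge : ¬ ((i : Int) < n) := by omega
        rw [pvALoop]
        simp only [hge, dif_neg, not_false_iff]
        have : (s.take n.toNat).drop i = [] := by
          apply List.drop_eq_nil_of_le
          simp only [List.length_take]
          omega
        rw [this]
        rfl
      | succ f ih =>
        intro i j k hf
        by_cases hlt : (i : Int) < n
        · have hi : i < n.toNat := by omega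
          have hilen : i < s.length := by omega
          have htlen : i < (s.take n.toNat).length := by
            simp only [List.length_take]; omega
          have hget : PySem.List.pyGet? s (i : Int) = some s[i] := by
            simp [PySem.List.pyGet?_natCast, hilen]
          have hdrop : (s.take n.toNat).drop i = s[i] :: (s.take n.toNat).drop (i+1) := by
            rw [List.drop_eq_getElem_cons htlen]
            congr 1
            simp [List.getElem_take]
          rw [pvALoop]
          simp only [hlt, dif_pos, hget, hdrop, pvL]
          have hcast : (i : Int) + 1 = ((i + 1 : Nat) : Int) := by push_cast; ring
          by_cases hc : s[i] = '#'
          · simp only [hc, if_pos rfl, hcast]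
            exact ih (i+1) (j+1) k (by omega)
          · simp only [if_neg hc]
            by_cases hj : j > 0
            · simp only [if_pos hj]
              by_cases hk : (b.length : Int) ≤ k
              · simp [hk]
              · simp only [if_neg hk]
                by_cases hb : PySem.List.pyGet? b k ≠ some j
                · simp [hb]
                · simp only [if_neg hb, hcast]
                  exact ih (i+1) 0 (k+1) (by omega)
            · simp only [if_neg hj, hcast]
              exact ih (i+1) 0 k (by omega)
        · have : (s.take n.toNat).drop i = [] := by
            apply List.drop_eq_nil_of_le
            simp only [List.length_take]; omega
          rw [pvALoop]
          simp only [hlt, dif_neg, not_false_iff, this]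
          rfl
    exact hfuel (n - i).toNat i j k le_rfl
  · rw [pvALoop]
    simp only [h, dif_neg, not_false_iff]
    have : (s.take n.toNat).drop i = [] := by
      apply List.drop_eq_nil_of_le
      simp only [List.length_take]; omega
    rw [this]
    rfl

-- map a list of Nat run lengths to Int
def pvInts : List Nat → List Int
  | [] => []
  | m :: l => (m : Int) :: pvInts l

theorem pvInts_cons (m : Nat) (l : List Nat) : pvInts (m :: l) = (m : Int) :: pvInts l := rfl

theorem pvInts_append (l₁ l₂ : List Nat) : pvInts (l₁ ++ l₂) = pvInts l₁ ++ pvInts l₂ := by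
  induction l₁ with
  | nil => rfl
  | cons m ms ih => simp [pvInts, ih]

theorem pvInts_length (l : List Nat) : (pvInts l).length = l.length := by
  induction l with
  | nil => rfl
  | cons m ms ih => simp [pvInts, ih]

theorem pvL_spec (cs : List Char) (b : List Int) (j : Nat) (k : Nat) (hk : k ≤ b.length) :
    pvL cs b (j : Int) (k : Int) =
      if pvInts (pvRuns cs j) <+: b.drop k then
        Sum.inr ((pvTrail cs j : Int), (k : Int) + ((pvRuns cs j).length : Int))
      else Sum.inl false := by
  induction cs generalizing j k with
  | nil => simp [pvL, pvRuns, pvTrail, pvInts]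
  | cons c rest ih =>
    rw [show pvL (c :: rest) b (j : Int) (k : Int) =
        (if c = '#' then pvL rest b ((j : Int)+1) k
         else
           if (j : Int) > 0 then
             if (b.length : Int) ≤ (k : Int) then Sum.inl false
             else if PySem.List.pyGet? b (k : Int) ≠ some (j : Int) then Sum.inl false
             else pvL rest b 0 ((k : Int)+1)
           else pvL rest b 0 (k : Int)) from rfl]
    rw [show pvRuns (c :: rest) j =
        (if c = '#' then pvRuns rest (j+1)
         else (if j = 0 then [] else [j]) ++ pvRuns rest 0) from rfl]
    rw [show pvTrail (c :: rest) j =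
        (if c = '#' then pvTrail rest (j+1) else pvTrail rest 0) from rfl]
    by_cases hc : c = '#'
    · rw [if_pos hc, if_pos hc, if_pos hc]
      have hcast : (j : Int) + 1 = ((j + 1 : Nat) : Int) := by push_cast; ring
      rw [hcast]
      exact ih (j+1) k hk
    · rw [if_neg hc, if_neg hc, if_neg hc]
      by_cases hj : j = 0
      · subst hj
        have h0 : ¬ ((0 : Nat) : Int) > 0 := by norm_num
        rw [if_neg h0, if_pos rfl, List.nil_append]
        have := ih 0 k hk
        rw [Nat.cast_zero] at this
        exact this
      · have hjpos : ((j : Nat) : Int) > 0 := by omega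
        rw [if_pos hjpos, if_neg hj]
        rw [show ([j] ++ pvRuns rest 0 : List Nat) = j :: pvRuns rest 0 from rfl]
        rw [pvInts_cons]
        by_cases hbk : (b.length : Int) ≤ (k : Int)
        · have hk' : k = b.length := by omega
          have hdrop : b.drop k = [] := by rw [hk']; simp
          rw [if_pos hbk, hdrop]
          rw [if_neg (by simp : ¬ ((j : Int) :: pvInts (pvRuns rest 0) <+: ([] : List Int)))]
        · have hklt : k < b.length := by
            omega
          have hget : PySem.List.pyGet? b (k : Int) = some (b[k]'hklt) := by
            rw [PySem.List.pyGet?_natCast]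
            exact List.getElem?_eq_getElem hklt
          have hdrop : b.drop k = b[k]'hklt :: b.drop (k+1) := List.drop_eq_getElem_cons hklt
          rw [if_neg hbk, hget, hdrop]
          by_cases hbj : b[k]'hklt = (j : Int)
          · rw [if_neg (by simp [hbj] : ¬ (some (b[k]'hklt) ≠ some (j : Int)))]
            have hcast : (k : Int) + 1 = ((k + 1 : Nat) : Int) := by push_cast; ring
            rw [hcast]
            have hih := ih 0 (k+1) (by omega)
            rw [Nat.cast_zero] at hih
            rw [hih]
            have hpre : ((j : Int) :: pvInts (pvRuns rest 0) <+:
                b[k]'hklt :: b.drop (k+1)) ↔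
                pvInts (pvRuns rest 0) <+: b.drop (k+1) := by
              rw [List.cons_prefix_cons]
              simp [hbj]
            by_cases hp : pvInts (pvRuns rest 0) <+: b.drop (k+1)
            · rw [if_pos hp, if_pos (hpre.mpr hp)]
              have harith : ((k + 1 : Nat) : Int) + ((pvRuns rest 0).length : Int)
                  = (k : Int) + ((j :: pvRuns rest 0).length : Int) := by
                rw [List.length_cons]
                push_cast
                ring
              rw [harith]
            · rw [if_neg hp, if_neg (fun h => hp (hpre.mp h))]
          · rw [if_pos (by simp [hbj] : (some (b[k]'hklt) ≠ some (j : Int)))]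
            rw [if_neg (by rw [List.cons_prefix_cons]; rintro ⟨h1, -⟩; exact hbj h1.symm)]

theorem pvL_spec0 (cs : List Char) (b : List Int) :
    pvL cs b 0 0 =
      if pvInts (pvRuns cs 0) <+: b then
        Sum.inr ((pvTrail cs 0 : Int), ((pvRuns cs 0).length : Int))
      else Sum.inl false := by
  have h := pvL_spec cs b 0 0 (Nat.zero_le _)
  simp only [Nat.cast_zero, List.drop_zero, zero_add] at h
  exact h

theorem pvGo_acc (xs : List Char) : ∀ (cur : List Char) (acc : List (List Char)),
    PySem.Chars.split₀.go xs cur acc = acc.reverse ++ PySem.Chars.split₀.go xs cur [] := by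
  induction xs with
  | nil =>
    intro cur acc
    simp only [PySem.Chars.split₀.go]
    by_cases h : cur.isEmpty <;> simp [h]
  | cons c rest ih =>
    intro cur acc
    simp only [PySem.Chars.split₀.go]
    by_cases hs : PySem.Chars.isspace c
    · simp only [hs, if_pos]
      by_cases he : cur.isEmpty
      · simp only [he, if_pos]
        exact ih [] acc
      · simp only [he, Bool.false_eq_true, if_false]
        rw [ih [] (cur.reverse :: acc), ih [] [cur.reverse]]
        simp
    · simp only [hs, Bool.false_eq_true, if_false]
      exact ih (c :: cur) acc

theorem pvGo_runs (cs : List Char) : ∀ j : Nat,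
    PySem.Chars.split₀.go (cs.map (fun c => if c = '#' then c else ' '))
        (List.replicate j '#') [] =
      (pvRuns cs j).map (fun m => List.replicate m '#') ++
        (if pvTrail cs j = 0 then [] else [List.replicate (pvTrail cs j) '#']) := by
  induction cs with
  | nil =>
    intro j
    simp only [List.map_nil, PySem.Chars.split₀.go, pvRuns, pvTrail]
    by_cases hj : j = 0 <;> simp [hj, List.reverse_replicate]
  | cons c rest ih =>
    intro j
    rw [show pvRuns (c :: rest) j =
        (if c = '#' then pvRuns rest (j+1)
         else (if j = 0 then [] else [j]) ++ pvRuns rest 0) from rfl]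
    rw [show pvTrail (c :: rest) j =
        (if c = '#' then pvTrail rest (j+1) else pvTrail rest 0) from rfl]
    by_cases hc : c = '#'
    · subst hc
      have hs : PySem.Chars.isspace '#' = false := by decide
      rw [List.map_cons, if_pos rfl, if_pos rfl, if_pos rfl]
      simp only [PySem.Chars.split₀.go, hs, Bool.false_eq_true, if_false]
      rw [← List.replicate_succ]
      exact ih (j+1)
    · have hs : PySem.Chars.isspace ' ' = true := by decide
      rw [List.map_cons, if_neg hc, if_neg hc, if_neg hc]
      simp only [PySem.Chars.split₀.go, hs, if_pos]
      by_cases hj : j = 0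
      · subst hj
        simp only [List.replicate_zero, List.isEmpty_nil, if_pos, if_true, List.nil_append]
        exact ih 0
      · have hne : (List.replicate j '#').isEmpty = false := by
          cases j with
          | zero => exact absurd rfl hj
          | succ m => rw [List.replicate_succ]; rfl
        simp only [hne, Bool.false_eq_true, if_false, if_neg hj]
        have hih := ih 0
        rw [List.replicate_zero] at hih
        rw [pvGo_acc _ [] [(List.replicate j '#').reverse], hih]
        simp [List.reverse_replicate]

theorem pvSplit_spec (cs : List Char) :
    (PySem.Chars.split₀ (cs.map (fun c => if c = '#' then c else ' '))).map
        (fun r => (r.length : Int)) =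
      pvInts (pvRuns cs 0) ++
        (if pvTrail cs 0 = 0 then [] else [(pvTrail cs 0 : Int)]) := by
  have h := pvGo_runs cs 0
  rw [List.replicate_zero] at h
  rw [PySem.Chars.split₀, h, List.map_append, List.map_map]
  congr 1
  · induction pvRuns cs 0 with
    | nil => rfl
    | cons m ms ih => simp [pvInts, Function.comp, ih]
  · by_cases ht : pvTrail cs 0 = 0 <;> simp [ht]

theorem pvTrail_ne_zero (cs : List Char) : ∀ j : Nat,
    pvTrail cs j ≠ 0 ↔ (cs.getLast? = some '#' ∨ (cs = [] ∧ j ≠ 0)) := by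
  induction cs with
  | nil => intro j; simp [pvTrail]
  | cons c rest ih =>
    intro j
    rw [show pvTrail (c :: rest) j =
        (if c = '#' then pvTrail rest (j+1) else pvTrail rest 0) from rfl]
    cases rest with
    | nil =>
      by_cases hc : c = '#' <;> simp [pvTrail, hc]
    | cons d rs =>
      rw [List.getLast?_cons_cons]
      by_cases hc : c = '#'
      · rw [if_pos hc, ih (j+1)]
        simp
      · rw [if_neg hc, ih 0]
        simp

theorem pvTrail_zero_iff (cs : List Char) :
    pvTrail cs 0 = 0 ↔ ¬ (cs.getLast? = some '#') := by
  constructor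
  · intro h0 hl
    exact absurd h0 ((pvTrail_ne_zero cs 0).mpr (Or.inl hl))
  · intro hl
    by_contra h0
    rcases (pvTrail_ne_zero cs 0).mp h0 with h1 | h1
    · exact hl h1
    · exact h1.2 rfl

theorem pvPyGet_neg_one (cs : List Char) (h : cs ≠ []) :
    PySem.List.pyGet? cs (-1) = cs.getLast? := by
  have hlen : 1 ≤ cs.length := by
    cases cs with
    | nil => exact absurd rfl h
    | cons x xs => simp
  simp only [PySem.List.pyGet?, PySem.List.pyIdx?]
  have h1 : ¬ ((0 : Int) ≤ -1) := by norm_num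
  have h2 : -(cs.length : Int) ≤ -1 := by
    simp only [neg_le_neg_iff]
    exact_mod_cast hlen
  rw [if_neg h1, if_pos h2]
  show cs[cs.length - 1]? = cs.getLast?
  rw [List.getLast?_eq_getElem?]

theorem pvFinal_snoc_gen (G : List Int) (t : Int) (b : List Int) :
    (if G <+: b then
       (if (b.length : Int) ≤ (G.length : Int) then false
        else if PySem.List.pyGet? b (G.length : Int) ≠ some t then false
        else decide (¬ ((G.length : Int) + 1 < (b.length : Int))))
     else false) = decide (G ++ [t] = b) := by
  by_cases hp : G <+: b
  · rw [if_pos hp]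
    obtain ⟨r, rfl⟩ := hp
    by_cases hlen : ((G ++ r).length : Int) ≤ (G.length : Int)
    · rw [if_pos hlen]
      have hr : r = [] := by
        cases r with
        | nil => rfl
        | cons x xs =>
          exfalso
          rw [List.length_append] at hlen
          push_cast at hlen
          simp at hlen
          omega
      subst hr
      symm
      rw [decide_eq_false_iff_not]
      intro hEq
      have h1 := List.append_cancel_left hEq
      simp at h1
    · rw [if_neg hlen]
      have hrpos : 0 < r.length := by
        rw [List.length_append] at hlen
        push_cast at hlen
        omega
      have hGlt : G.length < (G ++ r).length := by
        rw [List.length_append]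
        omega
      rw [PySem.List.pyGet?_natCast, List.getElem?_eq_getElem hGlt]
      have hgr : (G ++ r)[G.length]'hGlt = r[0]'hrpos := by
        rw [List.getElem_append_right (le_refl G.length)]
        congr 1
        omega
      by_cases hbt : r[0]'hrpos = t
      · rw [if_neg (by simp [hgr, hbt] : ¬ (some ((G ++ r)[G.length]'hGlt) ≠ some t))]
        rw [decide_eq_decide]
        constructor
        · intro hle
          have hr1 : r.length = 1 := by
            rw [List.length_append] at hle
            push_cast at hle
            omega
          obtain ⟨x, rfl⟩ := List.length_eq_one_iff.mp hr1
          have hx : x = t := by simpa using hbt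
          rw [hx]
        · intro hEq
          have hr1 : r = [t] := (List.append_cancel_left hEq).symm
          subst hr1
          rw [List.length_append, List.length_singleton]
          push_cast
          omega
      · rw [if_pos (show some ((G ++ r)[G.length]'hGlt) ≠ some t from by
          rw [hgr]; exact fun h => hbt (Option.some.inj h))]
        symm
        rw [decide_eq_false_iff_not]
        intro hEq
        have hr1 : r = [t] := (List.append_cancel_left hEq).symm
        subst hr1
        exact hbt (by simp)
  · rw [if_neg hp]
    symm
    rw [decide_eq_false_iff_not]
    intro hEq
    exact hp (hEq ▸ List.prefix_append G [t])

theorem pvFinal_snoc (Gn : List Nat) (t : Int) (b : List Int) :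
    (if pvInts Gn <+: b then
       (if (b.length : Int) ≤ (Gn.length : Int) then false
        else if PySem.List.pyGet? b (Gn.length : Int) ≠ some t then false
        else decide (¬ ((Gn.length : Int) + 1 < (b.length : Int))))
     else false) = decide (pvInts Gn ++ [t] = b) := by
  have hl : (Gn.length : Int) = ((pvInts Gn).length : Int) := by
    rw [pvInts_length]
  rw [hl]
  exact pvFinal_snoc_gen (pvInts Gn) t b

theorem pvFinal_exact_gen (G : List Int) (b : List Int) :
    (if G <+: b then decide (¬ ((G.length : Int) < (b.length : Int))) else false)
      = decide (G = b) := by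
  by_cases hp : G <+: b
  · rw [if_pos hp]
    obtain ⟨r, rfl⟩ := hp
    rw [decide_eq_decide]
    constructor
    · intro hle
      have hr : r = [] := by
        rw [List.length_append] at hle
        push_cast at hle
        have : r.length = 0 := by omega
        exact List.length_eq_zero_iff.mp this
      subst hr
      simp
    · intro hEq
      have hr : r = [] := by
        have h1 := congrArg List.length hEq
        rw [List.length_append] at h1
        have : r.length = 0 := by omega
        exact List.length_eq_zero_iff.mp this
      subst hr
      simp
  · rw [if_neg hp]
    symm
    rw [decide_eq_false_iff_not]
    intro hEq
    exact hp (hEq ▸ List.prefix_refl G)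

theorem pvFinal_exact (Gn : List Nat) (b : List Int) :
    (if pvInts Gn <+: b then decide (¬ ((Gn.length : Int) < (b.length : Int))) else false)
      = decide (pvInts Gn = b) := by
  have hl : (Gn.length : Int) = ((pvInts Gn).length : Int) := by
    rw [pvInts_length]
  rw [hl]
  exact pvFinal_exact_gen (pvInts Gn) b

-- A's group list on the natural domain: completed runs of a[:n], plus the still-open run
-- appended (even when it is 0) exactly when the LAST character of a is '#'
def pvX (s : List Char) (n : Int) : List Int :=
  if s.getLast? = some '#' then
    pvInts (pvRuns (s.take n.toNat) 0) ++ [(pvTrail (s.take n.toNat) 0 : Int)]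
  else pvInts (pvRuns (s.take n.toNat) 0)

-- B's group list: all '#'-run lengths of a[:n], the trailing one included when nonempty
def pvY (pre : List Char) : List Int :=
  pvInts (pvRuns pre 0) ++ (if pvTrail pre 0 = 0 then [] else [(pvTrail pre 0 : Int)])

theorem pvNotIsIn (s : List Char) (h : '?' ∉ s) :
    PySem.Chars.isIn ['?'] s = false := by
  cases hi : PySem.Chars.isIn ['?'] s
  · rfl
  · exfalso
    rw [PySem.Chars.isIn_iff_infix] at hi
    exact h (hi.subset (by simp))

theorem pvIsIn_of_mem (s : List Char) (h : '?' ∈ s) :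
    PySem.Chars.isIn ['?'] s = true := by
  rw [PySem.Chars.isIn_iff_infix]
  obtain ⟨l1, l2, hx⟩ := List.append_of_mem h
  exact ⟨l1, l2, by rw [hx]; simp⟩

theorem pvA_char (a : String) (b : List Int) (n : Int) (hnm : '?' ∉ a.toList)
    (hne : a.toList ≠ []) (hlen : n ≤ (a.toList.length : Int)) :
    try_py a b n = decide (pvX a.toList n = b) := by
  unfold try_py
  have hq' := pvNotIsIn a.toList hnm
  have hloop := pvALoop_eq a.toList b n hlen 0 0 0
  rw [Nat.cast_zero, List.drop_zero, pvL_spec0] at hloop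
  have hgl := pvPyGet_neg_one a.toList hne
  simp only [hq', Bool.false_eq_true, if_false, hloop, hgl]
  unfold pvX
  cases hlast : a.toList.getLast? with
  | none => exact absurd (List.getLast?_eq_none_iff.mp hlast) hne
  | some c =>
    by_cases hc : c = '#'
    · subst hc
      rw [if_pos rfl]
      have hfs := pvFinal_snoc (pvRuns (a.toList.take n.toNat) 0)
        ((pvTrail (a.toList.take n.toNat) 0 : Int)) b
      by_cases hp : pvInts (pvRuns (a.toList.take n.toNat) 0) <+: b
      · rw [if_pos hp] at hfs ⊢
        simp only [if_pos rfl]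
        exact hfs
      · rw [if_neg hp] at hfs ⊢
        exact hfs
    · rw [if_neg (by simp [hc] : ¬ (some c = some '#'))]
      have hfe := pvFinal_exact (pvRuns (a.toList.take n.toNat) 0) b
      by_cases hp : pvInts (pvRuns (a.toList.take n.toNat) 0) <+: b
      · rw [if_pos hp] at hfe ⊢
        simp only [if_neg hc]
        exact hfe
      · rw [if_neg hp] at hfe ⊢
        exact hfe

theorem pvB_char (a : String) (b : List Int) (n : Int) (hnm : '?' ∉ a.toList)
    (hn0 : 0 ≤ n) :
    try_py_alt a b n = decide (pvY (a.toList.take n.toNat) = b) := by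
  unfold try_py_alt
  have hq' := pvNotIsIn a.toList hnm
  simp only [hq', Bool.false_eq_true, if_false]
  rw [PySem.List.slice_to _ hn0, pvSplit_spec]
  rfl

theorem pvG_eq (cs : List Char) : ∀ j : Nat,
    pvG cs j = pvInts (pvRuns cs j) ++
      (if pvTrail cs j = 0 then [] else [(pvTrail cs j : Int)]) := by
  induction cs with
  | nil =>
    intro j
    by_cases hj : j = 0 <;> simp [pvG, pvRuns, pvTrail, pvInts, hj]
  | cons c rest ih =>
    intro j
    rw [show pvG (c :: rest) j =
        (if c = '#' then pvG rest (j+1)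
         else (if j = 0 then [] else [(j : Int)]) ++ pvG rest 0) from rfl]
    rw [show pvRuns (c :: rest) j =
        (if c = '#' then pvRuns rest (j+1)
         else (if j = 0 then [] else [j]) ++ pvRuns rest 0) from rfl]
    rw [show pvTrail (c :: rest) j =
        (if c = '#' then pvTrail rest (j+1) else pvTrail rest 0) from rfl]
    by_cases hc : c = '#'
    · simp only [hc, if_pos rfl]
      exact ih (j+1)
    · simp only [if_neg hc]
      rw [pvInts_append, ih 0, List.append_assoc]
      by_cases hj : j = 0 <;> simp [hj, pvInts]

theorem pvXY_agree (s : List Char) (n : Int)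
    (hiff : ((s.take n.toNat).getLast? = some '#') ↔ (s.getLast? = some '#')) :
    pvX s n = pvY (s.take n.toNat) := by
  unfold pvX pvY
  by_cases hl : s.getLast? = some '#'
  · have hpl : (s.take n.toNat).getLast? = some '#' := hiff.mpr hl
    have ht : pvTrail (s.take n.toNat) 0 ≠ 0 := by
      rw [Ne, pvTrail_zero_iff]
      simp [hpl]
    rw [if_pos hl, if_neg ht]
  · have hpl : ¬ ((s.take n.toNat).getLast? = some '#') := fun h => hl (hiff.mp h)
    have ht : pvTrail (s.take n.toNat) 0 = 0 := (pvTrail_zero_iff _).mpr hpl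
    rw [if_neg hl, if_pos ht, List.append_nil]

theorem pvX_mismatch (s : List Char) (n : Int)
    (hiff : ¬ (((s.take n.toNat).getLast? = some '#') ↔ (s.getLast? = some '#'))) :
    pvX s n = (if s.getLast? = some '#' then pvY (s.take n.toNat) ++ [0]
               else (pvY (s.take n.toNat)).dropLast) := by
  unfold pvX pvY
  by_cases hl : s.getLast? = some '#'
  · have hpl : ¬ ((s.take n.toNat).getLast? = some '#') := by tauto
    have ht : pvTrail (s.take n.toNat) 0 = 0 := (pvTrail_zero_iff _).mpr hpl
    rw [if_pos hl, if_pos hl, if_pos ht, List.append_nil, ht]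
    simp
  · have hpl : (s.take n.toNat).getLast? = some '#' := by tauto
    have ht : pvTrail (s.take n.toNat) 0 ≠ 0 := by
      rw [Ne, pvTrail_zero_iff]; simp [hpl]
    rw [if_neg hl, if_neg hl, if_neg ht, List.dropLast_concat]

theorem pvX_ne_pvY (s : List Char) (n : Int)
    (hiff : ¬ (((s.take n.toNat).getLast? = some '#') ↔ (s.getLast? = some '#'))) :
    pvX s n ≠ pvY (s.take n.toNat) := by
  rw [pvX_mismatch s n hiff]
  unfold pvY
  by_cases hl : s.getLast? = some '#'
  · have hpl : ¬ ((s.take n.toNat).getLast? = some '#') := by tauto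
    have ht : pvTrail (s.take n.toNat) 0 = 0 := (pvTrail_zero_iff _).mpr hpl
    rw [if_pos hl, ht]
    intro h
    have := congrArg List.length h
    simp at this
  · have hpl : (s.take n.toNat).getLast? = some '#' := by tauto
    have ht : pvTrail (s.take n.toNat) 0 ≠ 0 := by
      rw [Ne, pvTrail_zero_iff]; simp [hpl]
    rw [if_neg hl, if_neg ht]
    intro h
    have := congrArg List.length h
    simp at this

-- ===== VERDICT (by name: the statements are the Claim_ definitions above) =====
theorem try_py_spec : Claim_unchanged_try_py := by
  unfold Claim_unchanged_try_py
  intro a b n _hdom hpre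
  unfold Spec_try_py
  intro hnd
  by_cases hnm : '?' ∈ a.toList
  · have h1 := pvIsIn_of_mem a.toList hnm
    unfold try_py try_py_alt
    simp only [h1, if_true]
  · rcases hpre with h | ⟨hne, hn0, hlen⟩
    · exact absurd h hnm
    · rw [pvA_char a b n hnm hne hlen, pvB_char a b n hnm hn0]
      by_cases hiff : (((a.toList.take n.toNat).getLast? = some '#') ↔
          (a.toList.getLast? = some '#'))
      · rw [pvXY_agree a.toList n hiff]
      · -- mismatch: ¬ D_ forces b away from both candidate lists, so both sides are false
        have hnlt : n < (a.toList.length : Int) := by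
          by_contra hge
          have heq : a.toList.take n.toNat = a.toList :=
            List.take_of_length_le (by omega)
          exact hiff (by rw [heq])
        have hbY : b ≠ pvG (a.toList.take n.toNat) 0 ∧
            b ≠ (if a.toList.getLast? = some '#' then pvG (a.toList.take n.toNat) 0 ++ [0]
                 else (pvG (a.toList.take n.toNat) 0).dropLast) := by
          by_contra hcon
          apply hnd
          unfold D_try_py
          refine ⟨hnm, hne, hn0, hnlt, hiff, ?_⟩
          tauto
        have hGY : pvG (a.toList.take n.toNat) 0 = pvY (a.toList.take n.toNat) :=
          pvG_eq _ 0
        have hA : pvX a.toList n ≠ b := by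
          rw [pvX_mismatch a.toList n hiff]
          intro h
          apply hbY.2
          rw [← h, hGY]
        have hB : pvY (a.toList.take n.toNat) ≠ b := by
          intro h
          exact hbY.1 (by rw [hGY, h])
        simp [hA, hB]

theorem try_py_changed : Claim_changed_try_py := by
  unfold Claim_changed_try_py
  refine ⟨by decide, by unfold Pre_try_py pvDiffWitness_try_py; decide,
    by unfold D_try_py pvDiffWitness_try_py; decide, ?_, by decide, by decide⟩
  show try_py "##." [2] 2 = false
  rw [pvA_char "##." [2] 2 (by decide) (by decide) (by decide)]
  decide

theorem try_py_tight : Claim_exact_try_py := by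
  unfold Claim_exact_try_py
  intro a b n _hdom _hpre hd
  obtain ⟨hnm, hne, hn0, hnlt, hiff, hb⟩ := hd
  rw [pvA_char a b n hnm hne (le_of_lt hnlt), pvB_char a b n hnm hn0]
  have hGY : pvG (a.toList.take n.toNat) 0 = pvY (a.toList.take n.toNat) := pvG_eq _ 0
  have hXY : pvX a.toList n ≠ pvY (a.toList.take n.toNat) := pvX_ne_pvY a.toList n hiff
  rcases hb with hb | hb
  · -- b is B's list: B answers true, A false
    rw [hb, hGY]
    simp [hXY]
  · -- b is A's list: A answers true, B false
    have hbX : b = pvX a.toList n := by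
      rw [hb, pvX_mismatch a.toList n hiff, hGY]
    have h2 : pvY (a.toList.take n.toNat) ≠ pvX a.toList n := fun h => hXY h.symm
    rw [hbX]
    simp [h2]
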